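-- pv_equiv track=rewrite | github.com/lbaleman/K3-CalculadoraTkinter | romanosClase.py | numParentesis
-- ===== SOURCE A (Python) =====
-- def numParentesis(cadena):
--     numP = 0
--     for c in cadena:
--         if c == '(':
--             numP +=1
--         else:
--             break
--
--     return numP
-- ===== SOURCE B (Python) =====
-- def numParentesis(cadena):
--     return len(cadena) - len(cadena.lstrip('('))
-- ===== Notes on version B (the rewrite author's own statement) =====
-- stated objective: idiomatic
-- what changed: Replaced the explicit counting loop with a loop-free length difference: len(cadena) - len(cadena.lstrip('(')), since lstrip removes exactly the maximal leading run of '('.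
import Mathlib
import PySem

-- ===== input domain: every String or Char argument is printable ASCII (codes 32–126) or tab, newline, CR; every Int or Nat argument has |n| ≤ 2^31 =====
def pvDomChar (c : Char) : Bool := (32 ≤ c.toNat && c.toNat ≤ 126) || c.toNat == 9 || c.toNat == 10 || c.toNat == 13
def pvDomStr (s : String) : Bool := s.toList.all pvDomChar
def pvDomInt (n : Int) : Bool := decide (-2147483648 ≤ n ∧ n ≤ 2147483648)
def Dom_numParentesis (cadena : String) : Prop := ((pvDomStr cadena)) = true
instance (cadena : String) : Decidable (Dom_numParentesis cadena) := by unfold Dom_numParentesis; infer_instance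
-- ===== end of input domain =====

-- B replaces A's explicit counting loop (with break) by a loop-free length
-- difference after stripping the leading '(' run; idiomatic, same cost.

-- ===== PORT A =====
-- for c in cadena: if c == '(': numP += 1 else: break
def numParentesisLoop : List Char → Int → Int
  | [], numP => numP
  | c :: cs, numP => if c = '(' then numParentesisLoop cs (numP + 1) else numP

def numParentesis (cadena : String) : Int :=
  numParentesisLoop cadena.toList 0

-- ===== PORT B =====
-- len(cadena) - len(cadena.lstrip('(')); lstrip('(') ported as dropWhile (= '(')
def numParentesis_alt (cadena : String) : Int :=
  (cadena.toList.length : Int) - ((cadena.toList.dropWhile (· = '(')).length : Int)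

-- ===== PRECONDITION & SPEC =====
def Spec_numParentesis (cadena : String) (out : Int) : Prop := out = numParentesis_alt cadena
instance (cadena : String) (out : Int) : Decidable (Spec_numParentesis cadena out) := by unfold Spec_numParentesis; infer_instance

-- ===== CLAIM (what is proved, stated in full; the proofs are below) =====
def Claim_equal_numParentesis : Prop := ∀ (cadena : String), Dom_numParentesis cadena → Spec_numParentesis cadena (numParentesis cadena)

-- ===== LEMMAS AND PROOFS =====
theorem numParentesisLoop_eq (l : List Char) :
    ∀ n : Int, numParentesisLoop l n = n + ((l.length : Int) - ((l.dropWhile (· = '(')).length : Int)) := by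
  induction l with
  | nil => intro n; simp [numParentesisLoop]
  | cons c cs ih =>
    intro n
    by_cases h : c = '('
    · have hd : (c :: cs).dropWhile (· = '(') = cs.dropWhile (· = '(') := by
        simp [List.dropWhile, h]
      have hle : (cs.dropWhile (· = '(')).length ≤ cs.length := List.length_dropWhile_le _ _
      simp only [numParentesisLoop, if_pos h, ih, hd, List.length_cons]
      push_cast
      omega
    · have hd : (c :: cs).dropWhile (· = '(') = c :: cs := by
        simp [List.dropWhile, h]
      simp [numParentesisLoop, if_neg h, hd]

-- ===== VERDICT (by name: the statement is the Claim_ definition above) =====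
theorem numParentesis_spec : Claim_equal_numParentesis := by
  intro cadena _
  unfold Spec_numParentesis numParentesis numParentesis_alt
  simpa using numParentesisLoop_eq cadena.toList 0
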